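-- pv_equiv track=rewrite | github.com/miliar/Code_Jam_Webscraper | Solutions_python/Problem_180/1404.py | develop
-- ===== SOURCE A (Python) =====
-- def develop(artwork, complexity):
--     """
--     Develop artwork based on complexity
--     :param artwork: base artwork
--     :param complexity:
--     :return: modified artwork
--     """
--     if complexity == 1:
--         return artwork
--     out = []
--     for i in range(1,complexity):
--         for s in artwork:
--             if s=='L':
--                 out.extend(artwork)
--             else:
--                 out.extend(['G']*len(artwork))
--     return out
-- ===== SOURCE B (Python) =====
-- def develop(artwork, complexity):
--     if complexity == 1:
--         return artwork
--     n = len(artwork)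
--     total = (complexity - 1) * n * n
--     return [artwork[k % n] if artwork[k // n % n] == 'L' else 'G'
--             for k in range(total)]
-- ===== Notes on version B (the rewrite author's own statement) =====
-- stated objective: alternative
-- what changed: Computes each output element directly from its flat index by closed-form arithmetic (k//n%n picks the controlling source element, k%n the column) over one range of length (complexity-1)*n*n, instead of building the list by nested loops with extend/replication.
import Mathlib
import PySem

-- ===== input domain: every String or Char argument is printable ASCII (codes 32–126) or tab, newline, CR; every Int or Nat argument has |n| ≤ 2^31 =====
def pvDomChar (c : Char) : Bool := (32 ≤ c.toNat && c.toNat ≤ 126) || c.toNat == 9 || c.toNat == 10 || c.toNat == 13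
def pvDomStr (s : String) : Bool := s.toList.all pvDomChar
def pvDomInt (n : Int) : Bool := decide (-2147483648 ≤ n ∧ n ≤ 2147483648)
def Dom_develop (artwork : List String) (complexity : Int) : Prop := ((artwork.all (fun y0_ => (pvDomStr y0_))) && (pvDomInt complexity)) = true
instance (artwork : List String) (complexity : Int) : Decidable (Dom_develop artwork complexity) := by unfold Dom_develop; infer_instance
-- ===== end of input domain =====

-- B computes each output element directly from its flat index by closed-form
-- arithmetic (k//n%n picks the controlling source element, k%n the column),
-- instead of building the list with nested extend loops (objective: alternative).


-- ===== PORT A =====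
def develop (artwork : List String) (complexity : Int) : List String :=
  if complexity == 1 then artwork
  else
    (PySem.List.pyRange 1 complexity 1).foldl
      (fun out _ =>
        artwork.foldl
          (fun out s =>
            if s == "L" then out ++ artwork
            else out ++ List.replicate artwork.length "G") out)
      []

-- ===== PORT B =====
-- The list indices k % n and k // n % n are always in [0, n) here (k ranges over
-- [0, total) and total > 0 forces n > 0), so pyGetD's default is never reached.
def develop_alt (artwork : List String) (complexity : Int) : List String :=
  if complexity == 1 then artwork
  else
    let n : Int := artwork.length
    let total := (complexity - 1) * n * n
    (PySem.List.pyRange 0 total 1).map (fun k =>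
      if PySem.List.pyGetD artwork (PySem.Int.mod (PySem.Int.floordiv k n) n) "" == "L"
      then PySem.List.pyGetD artwork (PySem.Int.mod k n) ""
      else "G")

-- ===== PRECONDITION & SPEC =====
def Spec_develop (artwork : List String) (complexity : Int) (out : List String) : Prop := out = develop_alt artwork complexity
instance (artwork : List String) (complexity : Int) (out : List String) : Decidable (Spec_develop artwork complexity out) := by unfold Spec_develop; infer_instance

-- ===== CLAIM (what is proved, stated in full; the proofs are below) =====
def Claim_equal_develop : Prop := ∀ (artwork : List String) (complexity : Int), Dom_develop artwork complexity → Spec_develop artwork complexity (develop artwork complexity)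

-- ===== LEMMAS AND PROOFS =====

-- A's inner loop appends one chunk per element of artwork: acc ++ flatMap.
theorem pv_inner (artwork : List String) (acc : List String) :
    artwork.foldl
      (fun out s =>
        if s == "L" then out ++ artwork
        else out ++ List.replicate artwork.length "G") acc
    = acc ++ artwork.flatMap
        (fun s => if s == "L" then artwork else List.replicate artwork.length "G") := by
  have hfun : (fun (out : List String) (s : String) =>
      if s == "L" then out ++ artwork
      else out ++ List.replicate artwork.length "G")
      = fun out s => out ++ (if s == "L" then artwork else List.replicate artwork.length "G") := by
    funext out s; split <;> rfl
  rw [hfun, PySem.List.foldl_append_eq_flatMap]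

-- A's outer loop appends the same block once per iteration.
theorem pv_loop (artwork : List String) (l : List Int) (acc : List String) :
    l.foldl
      (fun out (_ : Int) =>
        artwork.foldl
          (fun out s =>
            if s == "L" then out ++ artwork
            else out ++ List.replicate artwork.length "G") out) acc
    = acc ++ (List.replicate l.length
        (artwork.flatMap
          (fun s => if s == "L" then artwork else List.replicate artwork.length "G"))).flatten := by
  induction l generalizing acc with
  | nil => simp
  | cons x xs ih =>
    rw [List.foldl_cons, pv_inner, ih]
    simp [List.replicate_succ, List.append_assoc]

-- B's per-index function, on the Nat side.
def pvIdx (artwork : List String) (k : Nat) : String :=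
  if artwork.getD (k / artwork.length % artwork.length) "" == "L"
  then artwork.getD (k % artwork.length) "" else "G"

-- One block: indices [j*n, (j+1)*n) reproduce the first j+1 chunks of the flatMap.
theorem pv_chunk (artwork : List String) (j : Nat) (hj : j ≤ artwork.length) :
    (List.range (j * artwork.length)).map (pvIdx artwork)
    = (artwork.take j).flatMap
        (fun s => if s == "L" then artwork else List.replicate artwork.length "G") := by
  induction j with
  | zero => simp
  | succ j ih =>
    have hjn : j < artwork.length := hj
    have hsplit : (j + 1) * artwork.length = j * artwork.length + artwork.length := by ring
    rw [hsplit, List.range_add, List.map_append, ih (Nat.le_of_lt hjn), List.map_map]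
    have hchunk : (List.range artwork.length).map (pvIdx artwork ∘ (fun k => j * artwork.length + k))
        = if artwork[j] == "L" then artwork else List.replicate artwork.length "G" := by
      have hcong : ∀ i ∈ List.range artwork.length,
          (pvIdx artwork ∘ (fun k => j * artwork.length + k)) i
          = (fun i => if artwork[j] == "L" then artwork.getD i "" else "G") i := by
        intro i hi
        have hin : i < artwork.length := List.mem_range.mp hi
        have hcomm : j * artwork.length + i = i + j * artwork.length := by ring
        have h1 : (j * artwork.length + i) / artwork.length % artwork.length = j := by
          rw [hcomm, Nat.add_mul_div_right _ _ (by omega : 0 < artwork.length),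
            Nat.div_eq_of_lt hin]
          simp [Nat.mod_eq_of_lt hjn]
        have h2 : (j * artwork.length + i) % artwork.length = i := by
          rw [hcomm, Nat.add_mul_mod_self_right]
          exact Nat.mod_eq_of_lt hin
        have h3 : artwork.getD j "" = artwork[j] := List.getD_eq_getElem artwork "" hjn
        simp only [Function.comp, pvIdx, h1, h2, h3]
      rw [List.map_congr_left hcong]
      by_cases hL : artwork[j] == "L"
      · simp only [hL, if_true]
        apply List.ext_getElem
        · simp
        · intro i h1 h2
          simp [List.getElem?_eq_getElem h2]
      · simp [hL]
    rw [hchunk, List.take_succ_eq_append_getElem hjn, List.flatMap_append]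
    simp
-- The whole output: m blocks of n*n indices each.
theorem pv_blocks (artwork : List String) (hn : 0 < artwork.length) (m : Nat) :
    (List.range (m * (artwork.length * artwork.length))).map (pvIdx artwork)
    = (List.replicate m
        (artwork.flatMap
          (fun s => if s == "L" then artwork else List.replicate artwork.length "G"))).flatten := by
  induction m with
  | zero => simp
  | succ m ih =>
    have hsplit : (m + 1) * (artwork.length * artwork.length)
        = artwork.length * artwork.length + m * (artwork.length * artwork.length) := by ring
    have hper : ∀ k, pvIdx artwork (artwork.length * artwork.length + k) = pvIdx artwork k := by
      intro k
      unfold pvIdx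
      have hcomm : artwork.length * artwork.length + k = k + artwork.length * artwork.length := by
        ring
      rw [hcomm, Nat.add_mul_div_right _ _ hn, Nat.add_mul_mod_self_right, Nat.add_mod_right]
    rw [hsplit, List.range_add, List.map_append, List.map_map]
    have : (List.range (m * (artwork.length * artwork.length))).map
        (pvIdx artwork ∘ (fun k => artwork.length * artwork.length + k))
        = (List.range (m * (artwork.length * artwork.length))).map (pvIdx artwork) := by
      apply List.map_congr_left
      intro i _
      exact hper i
    rw [this, ih, List.replicate_succ, List.flatten_cons]
    congr 1
    have := pv_chunk artwork artwork.length (le_refl _)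
    simpa using this

-- ===== VERDICT (by name: the statement is the Claim_ definition above) =====
theorem develop_spec : Claim_equal_develop := by
  intro artwork complexity _
  unfold Spec_develop develop develop_alt
  by_cases h : complexity = 1
  · simp [h]
  · have hc : (complexity == 1) = false := by simpa using h
    simp only [hc, Bool.false_eq_true, if_false]
    rw [pv_loop, PySem.List.length_pyRange_one]
    simp only [List.nil_append]
    by_cases hcpos : 1 < complexity
    · -- complexity ≥ 2
      by_cases hn : artwork.length = 0
      · have hart : artwork = [] := List.eq_nil_of_length_eq_zero hn
        subst hart
        simp [PySem.List.pyRange]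
      · have hnpos : 0 < artwork.length := Nat.pos_of_ne_zero hn
        set n : Nat := artwork.length with hn_def
        have hm : complexity - 1 = ((complexity - 1).toNat : Int) := by omega
        have htot : (complexity - 1) * (n : Int) * (n : Int)
            = (((complexity - 1).toNat * (n * n) : Nat) : Int) := by
          calc (complexity - 1) * (n : Int) * (n : Int)
              = ((complexity - 1).toNat : Int) * (n : Int) * (n : Int) := by rw [← hm]
            _ = (((complexity - 1).toNat * (n * n) : Nat) : Int) := by push_cast; ring
        rw [htot, PySem.List.pyRange_zero_natCast, List.map_map]
        have heq : (List.range ((complexity - 1).toNat * (n * n))).map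
            ((fun k =>
              if PySem.List.pyGetD artwork (PySem.Int.mod (PySem.Int.floordiv k (artwork.length : Int)) (artwork.length : Int)) "" == "L"
              then PySem.List.pyGetD artwork (PySem.Int.mod k (artwork.length : Int)) ""
              else "G") ∘ (fun (k : Nat) => (k : Int)))
            = (List.range ((complexity - 1).toNat * (n * n))).map (pvIdx artwork) := by
          apply List.map_congr_left
          intro k _
          simp only [Function.comp, PySem.Int.floordiv_natCast, PySem.Int.mod_natCast,
            PySem.List.pyGetD_natCast, pvIdx]
        rw [heq, pv_blocks artwork hnpos]
    · -- complexity ≤ 0: both sides empty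
      have hle : complexity ≤ 0 := by omega
      have h1 : ((complexity - 1) : Int).toNat = 0 := by omega
      have h2 : (complexity - 1) * (artwork.length : Int) * (artwork.length : Int) ≤ 0 := by
        have hle1 : (complexity - 1 : Int) ≤ 0 := by omega
        have hnn : (0 : Int) ≤ (artwork.length : Int) * (artwork.length : Int) :=
          mul_nonneg (Int.natCast_nonneg _) (Int.natCast_nonneg _)
        nlinarith [hnn, hle1]
      rw [PySem.List.pyRange_one_eq_nil h2]
      simp [h1]
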